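-- pv_equiv track=rewrite | github.com/Phamvantuan-2006/bai-tap-ca-nhan-pham-van-tuan | bai56.py | to_binary_32
-- ===== SOURCE A (Python) =====
-- def to_binary_32(n):
--     # & với 0xFFFFFFFF để lấy 32 bit cuối (bù 2)
--     n = n & 0xFFFFFFFF
--
--     binary = ""
--
--     # Duyệt 32 bit
--     for i in range(31, -1, -1):
--         # Lấy từng bit bằng dịch phải và AND
--         bit = (n >> i) & 1
--         binary += str(bit)
--
--         # Thêm khoảng trắng mỗi 8 bit cho dễ nhìn
--         if i % 8 == 0:
--             binary += " "
--
--     return binary.strip()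
-- ===== SOURCE B (Python) =====
-- def to_binary_32(n):
--     s = format(n & 0xFFFFFFFF, 'b').zfill(32)
--     return ' '.join(s[i:i+8] for i in range(0, 32, 8))
-- ===== Notes on version B (the rewrite author's own statement) =====
-- stated objective: idiomatic
-- what changed: Replaces the per-bit shift/AND loop with repeated string concatenation and a final strip by a single binary-format-and-zero-pad conversion followed by a join over byte-sized slices.
import Mathlib
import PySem

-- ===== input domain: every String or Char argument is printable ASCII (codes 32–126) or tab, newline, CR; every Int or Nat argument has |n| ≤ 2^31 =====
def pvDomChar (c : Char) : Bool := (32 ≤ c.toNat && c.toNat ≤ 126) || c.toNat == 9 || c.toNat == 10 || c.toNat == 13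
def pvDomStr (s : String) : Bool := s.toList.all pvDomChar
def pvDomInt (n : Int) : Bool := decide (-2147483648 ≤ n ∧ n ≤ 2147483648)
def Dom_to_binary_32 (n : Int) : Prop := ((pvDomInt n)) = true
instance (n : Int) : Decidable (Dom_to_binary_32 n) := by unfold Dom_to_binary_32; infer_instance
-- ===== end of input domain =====

-- B formats the masked value in one conversion (format(...,'b').zfill(32)) and groups it by 8,
-- instead of A's per-bit shift/AND loop with string concatenation and a final strip (idiomatic).

-- ===== PORT A =====
-- strings are ported via their character lists (PySem.Chars); in range(31,-1,-1) every i is ≥ 0,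
-- so Python's n >> i is the Int shift m >>> i.toNat
def to_binary_32 (n : Int) : String :=
  let m := PySem.Int.band n 4294967295
  let binary : List Char :=
    (PySem.List.pyRange 31 (-1) (-1)).foldl
      (fun binary i =>
        let bit := PySem.Int.band (m >>> i.toNat) 1
        let binary := binary ++ PySem.Int.toChars bit
        if PySem.Int.mod i 8 == 0 then binary ++ [' '] else binary)
      []
  String.ofList (PySem.Chars.strip binary)

-- ===== PORT B =====
def to_binary_32_alt (n : Int) : String :=
  let s := PySem.Chars.zfill (PySem.Int.toBinChars (PySem.Int.band n 4294967295)) 32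
  String.ofList (PySem.Chars.join [' ']
    ((PySem.List.pyRange 0 32 8).map (fun i => PySem.List.slice s (some i) (some (i + 8)))))

-- ===== PRECONDITION & SPEC =====
def Spec_to_binary_32 (n : Int) (out : String) : Prop := out = to_binary_32_alt n
instance (n : Int) (out : String) : Decidable (Spec_to_binary_32 n out) := by unfold Spec_to_binary_32; infer_instance

-- ===== CLAIM (what is proved, stated in full; the proofs are below) =====
def Claim_equal_to_binary_32 : Prop := ∀ (n : Int), Dom_to_binary_32 n → Spec_to_binary_32 n (to_binary_32 n)

-- ===== LEMMAS AND PROOFS =====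

-- the character of bit i of a
def pvBC (a i : Nat) : Char := if a / 2 ^ i % 2 == 1 then '1' else '0'

-- the k low bits of a, most significant first
def pvRef (a : Nat) : Nat → List Char
  | 0 => []
  | k + 1 => pvBC a k :: pvRef a k

-- the common output: four 8-bit groups separated by single spaces
def pvOut (a : Nat) : List Char :=
  [pvBC a 31, pvBC a 30, pvBC a 29, pvBC a 28, pvBC a 27, pvBC a 26, pvBC a 25, pvBC a 24, ' ',
   pvBC a 23, pvBC a 22, pvBC a 21, pvBC a 20, pvBC a 19, pvBC a 18, pvBC a 17, pvBC a 16, ' ',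
   pvBC a 15, pvBC a 14, pvBC a 13, pvBC a 12, pvBC a 11, pvBC a 10, pvBC a 9,  pvBC a 8,  ' ',
   pvBC a 7,  pvBC a 6,  pvBC a 5,  pvBC a 4,  pvBC a 3,  pvBC a 2,  pvBC a 1,  pvBC a 0]

theorem pv_mask (n : Int) : ∃ a : Nat, PySem.Int.band n 4294967295 = (a : Int) ∧ a < 2 ^ 32 := by
  unfold PySem.Int.band
  split_ifs with h1 h2 h2
  · exact ⟨n.toNat &&& Int.toNat 4294967295, rfl,
      lt_of_le_of_lt Nat.and_le_right (by decide)⟩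
  · omega
  · exact ⟨Int.toNat 4294967295 - (Int.toNat 4294967295 &&& (-n - 1).toNat), rfl,
      lt_of_le_of_lt (Nat.sub_le _ _) (by decide)⟩
  · omega

theorem pv_bitchar (a k : Nat) :
    PySem.Int.toChars (PySem.Int.band ((a : Int) >>> ((k : Nat) : Int)) 1) = [pvBC a k] := by
  have h1 : ((a : Int) >>> ((k : Nat) : Int)) = ((a >>> k : Nat) : Int) := by
    rw [Int.shiftRight_natCast]
  have h2 : PySem.Int.band ((a >>> k : Nat) : Int) 1 = (((a >>> k) &&& 1 : Nat) : Int) := by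
    exact_mod_cast PySem.Int.band_natCast (a >>> k) 1
  rw [h1, h2, Nat.and_one_is_mod, Nat.shiftRight_eq_div_pow]
  unfold pvBC
  rcases Nat.mod_two_eq_zero_or_one (a / 2 ^ k) with h | h <;> rw [h] <;> decide

theorem pvBC_div2 (a i : Nat) : pvBC (a / 2) i = pvBC a (i + 1) := by
  unfold pvBC
  rw [Nat.div_div_eq_div_mul, ← pow_succ']

theorem pvRef_succ (a k : Nat) : pvRef a (k + 1) = pvRef (a / 2) k ++ [pvBC a 0] := by
  induction k with
  | zero => rfl
  | succ k ih =>
    show pvBC a (k + 1) :: pvRef a (k + 1) = (pvBC (a / 2) k :: pvRef (a / 2) k) ++ [pvBC a 0]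
    rw [ih, pvBC_div2, List.cons_append]

theorem pvRef_zero (k : Nat) : pvRef 0 k = List.replicate k '0' := by
  induction k with
  | zero => rfl
  | succ k ih =>
    show pvBC 0 k :: pvRef 0 k = _
    rw [ih, List.replicate_succ]
    congr 1
    unfold pvBC
    simp

theorem pv_pad (k a : Nat) (hk : 1 ≤ k) (h : a < 2 ^ k) :
    List.replicate (k - (Nat.toDigits 2 a).length) '0' ++ Nat.toDigits 2 a = pvRef a k := by
  induction k generalizing a with
  | zero => omega
  | succ k ih =>
    by_cases hk1 : k = 0
    · subst hk1
      interval_cases a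
      · decide
      · decide
    · by_cases ha : a < 2
      · rw [Nat.toDigits_of_lt_base ha, pvRef_succ, Nat.div_eq_of_lt ha, pvRef_zero]
        have hd : [a.digitChar] = [pvBC a 0] := by
          interval_cases a <;> decide
        rw [hd]
        simp
      · rw [Nat.toDigits_eq_if (by norm_num)]
        simp only [if_neg ha]
        have hd : [(a % 2).digitChar] = [pvBC a 0] := by
          rcases Nat.mod_two_eq_zero_or_one a with hm | hm <;>
            norm_num [pvBC, hm] <;> rfl
        rw [pvRef_succ, hd, ← List.append_assoc,
          ← ih (a / 2) (by omega) (by omega)]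
        have hl : k + 1 - ((Nat.toDigits 2 (a / 2) ++ [pvBC a 0]).length) =
            k - (Nat.toDigits 2 (a / 2)).length := by
          simp
        rw [hl]

theorem pv_zfill_digits (cs : List Char) (h : ∀ c ∈ cs, c.isDigit) :
    PySem.Chars.zfill cs 32 = List.replicate (32 - cs.length) '0' ++ cs := by
  unfold PySem.Chars.zfill
  split_ifs with h1
  · have h0 : 32 - cs.length = 0 := by omega
    rw [h0]
    simp
  · match cs, h with
    | [], _ => simp
    | c :: rest, h =>
      have hc : c.isDigit := h c (by simp)
      have hns : ¬ (c = '+' ∨ c = '-') := by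
        rintro (rfl | rfl) <;> simp [Char.isDigit] at hc
      simp only [List.length_cons]
      rw [if_neg hns]
      rfl

theorem pvRef32 (a : Nat) : pvRef a 32 =
    [pvBC a 31, pvBC a 30, pvBC a 29, pvBC a 28, pvBC a 27, pvBC a 26, pvBC a 25, pvBC a 24,
     pvBC a 23, pvBC a 22, pvBC a 21, pvBC a 20, pvBC a 19, pvBC a 18, pvBC a 17, pvBC a 16,
     pvBC a 15, pvBC a 14, pvBC a 13, pvBC a 12, pvBC a 11, pvBC a 10, pvBC a 9,  pvBC a 8,
     pvBC a 7,  pvBC a 6,  pvBC a 5,  pvBC a 4,  pvBC a 3,  pvBC a 2,  pvBC a 1,  pvBC a 0] := rfl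

theorem pv_alt_eq (n : Int) (a : Nat) (ha : PySem.Int.band n 4294967295 = (a : Int))
    (hlt : a < 2 ^ 32) : to_binary_32_alt n = String.ofList (pvOut a) := by
  unfold to_binary_32_alt
  rw [ha]
  have hb : PySem.Int.toBinChars (a : Int) = Nat.toDigits 2 a := by
    unfold PySem.Int.toBinChars
    rw [if_neg (by omega)]
    simp
  rw [hb, pv_zfill_digits _ (fun c hc => Nat.isDigit_of_mem_toDigits (by norm_num) (by norm_num) hc),
    pv_pad 32 a (by norm_num) hlt, pvRef32]
  rfl

theorem pv_isspace_pvBC (a i : Nat) : PySem.Chars.isspace (pvBC a i) = false := by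
  unfold pvBC
  split <;> decide

theorem pv_a_eq (n : Int) (a : Nat) (ha : PySem.Int.band n 4294967295 = (a : Int)) :
    to_binary_32 n = String.ofList (pvOut a) := by
  have hr : PySem.List.pyRange 31 (-1) (-1) =
      [31,30,29,28,27,26,25,24,23,22,21,20,19,18,17,16,15,14,13,12,11,10,9,8,7,6,5,4,3,2,1,0] := by
    decide
  simp only [to_binary_32, ha, hr]
  rw [PySem.List.foldl_congr_mem _ _
    (fun binary i => binary ++ (PySem.Int.toChars (PySem.Int.band ((a : Int) >>> ((i.toNat : Nat) : Int)) 1) ++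
      (if PySem.Int.mod i 8 == 0 then [' '] else []))) _
    (by
      intro acc x hx
      split <;> simp_all)]
  rw [PySem.List.foldl_append_eq_flatMap]
  simp only [List.nil_append, List.flatMap_cons, List.flatMap_nil, pv_bitchar]
  simp only [
    show (PySem.Int.mod 0 8 == 0) = true from rfl,
    show (PySem.Int.mod 1 8 == 0) = false from rfl,
    show (PySem.Int.mod 2 8 == 0) = false from rfl,
    show (PySem.Int.mod 3 8 == 0) = false from rfl,
    show (PySem.Int.mod 4 8 == 0) = false from rfl,
    show (PySem.Int.mod 5 8 == 0) = false from rfl,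
    show (PySem.Int.mod 6 8 == 0) = false from rfl,
    show (PySem.Int.mod 7 8 == 0) = false from rfl,
    show (PySem.Int.mod 8 8 == 0) = true from rfl,
    show (PySem.Int.mod 9 8 == 0) = false from rfl,
    show (PySem.Int.mod 10 8 == 0) = false from rfl,
    show (PySem.Int.mod 11 8 == 0) = false from rfl,
    show (PySem.Int.mod 12 8 == 0) = false from rfl,
    show (PySem.Int.mod 13 8 == 0) = false from rfl,
    show (PySem.Int.mod 14 8 == 0) = false from rfl,
    show (PySem.Int.mod 15 8 == 0) = false from rfl,
    show (PySem.Int.mod 16 8 == 0) = true from rfl,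
    show (PySem.Int.mod 17 8 == 0) = false from rfl,
    show (PySem.Int.mod 18 8 == 0) = false from rfl,
    show (PySem.Int.mod 19 8 == 0) = false from rfl,
    show (PySem.Int.mod 20 8 == 0) = false from rfl,
    show (PySem.Int.mod 21 8 == 0) = false from rfl,
    show (PySem.Int.mod 22 8 == 0) = false from rfl,
    show (PySem.Int.mod 23 8 == 0) = false from rfl,
    show (PySem.Int.mod 24 8 == 0) = true from rfl,
    show (PySem.Int.mod 25 8 == 0) = false from rfl,
    show (PySem.Int.mod 26 8 == 0) = false from rfl,
    show (PySem.Int.mod 27 8 == 0) = false from rfl,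
    show (PySem.Int.mod 28 8 == 0) = false from rfl,
    show (PySem.Int.mod 29 8 == 0) = false from rfl,
    show (PySem.Int.mod 30 8 == 0) = false from rfl,
    show (PySem.Int.mod 31 8 == 0) = false from rfl]
  simp [pvOut, PySem.Chars.strip, PySem.Chars.lstrip, PySem.Chars.rstrip,
    pv_isspace_pvBC, show PySem.Chars.isspace ' ' = true from rfl]

-- ===== VERDICT (by name: the statement is the Claim_ definition above) =====
theorem to_binary_32_spec : Claim_equal_to_binary_32 := by
  intro n _
  obtain ⟨a, ha, hlt⟩ := pv_mask n
  unfold Spec_to_binary_32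
  rw [pv_a_eq n a ha, pv_alt_eq n a ha hlt]
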